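-- pv_equiv track=rewrite | github.com/pierre-ecarlat/algorithms_experiments | aoc/2015/day5/solver.py | amINice
-- ===== SOURCE A (Python) =====
-- VOYELS = ['a', 'e', 'i', 'o', 'u']
--
-- NAUGHTY = ['ab', 'cd', 'pq', 'xy']
--
-- def amINice(text):
--     twice_in_a_row = False
--     number_voyels = int(text[0] in VOYELS)
--     for i in range(1, len(text)):
--         # If naughty
--         if text[i-1:i+1] in NAUGHTY:
--             return False
--         # Maybe twice in a row?
--         if text[i-1] == text[i]:
--             twice_in_a_row = True
--         # Voyel?
--         if text[i] in VOYELS: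
--             number_voyels += 1
--
--     return twice_in_a_row and number_voyels >= 3
-- ===== SOURCE B (Python) =====
-- VOYELS = ['a', 'e', 'i', 'o', 'u']
--
-- NAUGHTY = ['ab', 'cd', 'pq', 'xy']
--
-- def amINice(text):
--     if any(n in text for n in NAUGHTY):
--         return False
--     chars = list(text)
--     if sum(chars.count(v) for v in VOYELS) < 3:
--         return False
--     return any(c + c in text for c in set(chars))
-- ===== Notes on version B (the rewrite author's own statement) =====
-- stated objective: alternative
-- what changed: Replaced A's single index loop with early return and per-character accumulators by whole-string substring searches: naughty words via 'n in text', the doubled letter via 'c+c in text' over the distinct characters, and the vowel total as a sum of per-vowel counts.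
-- outside the precondition, e.g. on amINice(''): A raises IndexError, B returns False
-- crash fix: On the empty string A raises IndexError (it reads text[0] first); B naturally returns False. — e.g. on amINice(""): A raises IndexError, B returns false
import Mathlib
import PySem

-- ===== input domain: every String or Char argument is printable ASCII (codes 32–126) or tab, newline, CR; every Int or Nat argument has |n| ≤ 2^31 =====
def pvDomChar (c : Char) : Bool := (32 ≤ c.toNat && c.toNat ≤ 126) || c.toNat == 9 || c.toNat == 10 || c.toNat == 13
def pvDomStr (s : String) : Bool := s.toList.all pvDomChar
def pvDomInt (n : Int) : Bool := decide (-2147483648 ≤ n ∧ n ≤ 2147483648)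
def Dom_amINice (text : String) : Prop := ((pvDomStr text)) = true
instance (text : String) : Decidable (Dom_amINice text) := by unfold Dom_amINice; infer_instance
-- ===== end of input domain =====

-- B replaces A's fused index loop by whole-string substring searches (naughty words, doubled letter over the distinct characters) and a per-vowel count sum; same values on all non-empty strings (A raises IndexError on "").

-- ===== PORT A =====
def VOYELS : List Char := ['a', 'e', 'i', 'o', 'u']

-- Every NAUGHTY entry is a 2-char string and the slice text[i-1:i+1] with 1 ≤ i < len(text)
-- is exactly the 2-char string text[i-1],text[i]; A's membership test is on such Char pairs (exact).
def NAUGHTY_pairs : List (Char × Char) := [('a','b'), ('c','d'), ('p','q'), ('x','y')]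

-- A's for-loop over range(1, len(text)): state (prev = text[i-1], twice_in_a_row, number_voyels);
-- the counter is nonnegative throughout, kept as Nat.
def amINiceLoop : List Char → Char → Bool → Nat → Bool
  | [], _, twice, nv => twice && decide (nv ≥ 3)
  | c :: rest, prev, twice, nv =>
    if NAUGHTY_pairs.contains (prev, c) then false
    else amINiceLoop rest c (if prev == c then true else twice)
           (if VOYELS.contains c then nv + 1 else nv)

def amINice (text : String) : Bool :=
  match text.toList with
  | [] => false   -- Python raises IndexError on text[0] here; excluded by Pre_amINice
  | c :: rest => amINiceLoop rest c false (if VOYELS.contains c then 1 else 0)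

-- ===== PORT B =====
-- B's NAUGHTY entries are used as substrings of the whole text ('n in text').
def NAUGHTY_strs : List (List Char) := [['a','b'], ['c','d'], ['p','q'], ['x','y']]

def amINice_alt (text : String) : Bool :=
  let l := text.toList
  if NAUGHTY_strs.any (fun n => PySem.Chars.isIn n l) then false
  else if (VOYELS.map (fun v => l.count v)).sum < 3 then false
  else (PySem.Set.ofList l).any (fun c => PySem.Chars.isIn [c, c] l)

-- ===== PRECONDITION & SPEC =====
-- Pre_ excludes exactly the empty string, on which A raises IndexError (text[0]).
def Pre_amINice (text : String) : Prop := text ≠ ""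
instance (text : String) : Decidable (Pre_amINice text) := by unfold Pre_amINice; infer_instance
def pvWitness_amINice : String := "aaa"

-- On the empty string A raises IndexError (it reads text[0] first); B returns False.
def Raises_amINice (text : String) : Prop := text = ""
instance (text : String) : Decidable (Raises_amINice text) := by unfold Raises_amINice; infer_instance
def pvRaiseWitness_amINice : String := ""
def pvRaiseWitnessOut_amINice : Bool := false

def Spec_amINice (text : String) (out : Bool) : Prop := out = amINice_alt text
instance (text : String) (out : Bool) : Decidable (Spec_amINice text out) := by unfold Spec_amINice; infer_instance

-- ===== CLAIM (what is proved, stated in full; the proofs are below) =====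
def Claim_equal_amINice : Prop := ∀ (text : String), Dom_amINice text → Pre_amINice text → Spec_amINice text (amINice text)
def Claim_raises_amINice : Prop := (∀ (text : String), Dom_amINice text → Raises_amINice text → ¬ Pre_amINice text) ∧ (Dom_amINice (pvRaiseWitness_amINice) ∧ Raises_amINice (pvRaiseWitness_amINice) ∧ amINice_alt (pvRaiseWitness_amINice) = pvRaiseWitnessOut_amINice)

-- ===== LEMMAS AND PROOFS =====
-- A two-character substring is exactly an adjacent pair.
lemma infix_pair_iff (a b : Char) (l : List Char) :
    [a, b] <:+: l ↔ (a, b) ∈ l.zip l.tail := by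
  induction l with
  | nil => simp
  | cons x t ih =>
    cases t with
    | nil => simp [List.infix_cons_iff, List.cons_prefix_cons]
    | cons y t' =>
      rw [List.infix_cons_iff, ih]
      simp [List.cons_prefix_cons]

-- A's loop result, characterised over the adjacent pairs.
lemma amINiceLoop_eq (rest : List Char) (prev : Char) (twice : Bool) (nv : Nat) :
    amINiceLoop rest prev twice nv =
      (if ((prev :: rest).zip rest).any (fun p => NAUGHTY_pairs.contains p) then false
       else (twice || ((prev :: rest).zip rest).any (fun p => p.1 == p.2)) &&
            decide (nv + rest.countP (fun c => VOYELS.contains c) ≥ 3)) := by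
  induction rest generalizing prev twice nv with
  | nil => simp [amINiceLoop]
  | cons c rest ih =>
    simp only [amINiceLoop, List.zip_cons_cons, List.any_cons, List.countP_cons]
    cases h : NAUGHTY_pairs.contains (prev, c) with
    | true => simp
    | false =>
      simp only [Bool.false_eq_true, Bool.false_or, if_false, ih]
      cases hn : ((c :: rest).zip rest).any (fun p => NAUGHTY_pairs.contains p) with
      | true => simp
      | false =>
        simp only [Bool.false_eq_true, if_false]
        cases hd : (prev == c) <;> cases hv : VOYELS.contains c <;>
          simp [decide_eq_decide] <;> first | rfl | omega | (congr 1 <;> simp only [decide_eq_decide] <;> omega)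

-- B's naughty substring search equals A's adjacent-pair membership test.
lemma naughty_eq (l : List Char) :
    NAUGHTY_strs.any (fun n => PySem.Chars.isIn n l) =
      (l.zip l.tail).any (fun p => NAUGHTY_pairs.contains p) := by
  rw [Bool.eq_iff_iff]
  simp only [NAUGHTY_strs, NAUGHTY_pairs, List.any_cons, List.any_nil, Bool.or_eq_true,
    PySem.Chars.isIn_iff_infix, infix_pair_iff, List.any_eq_true, List.contains_cons,
    List.contains_nil, beq_iff_eq, Bool.false_eq_true, or_false]
  constructor
  · rintro (h | h | h | h)
    · exact ⟨('a','b'), h, Or.inl rfl⟩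
    · exact ⟨('c','d'), h, Or.inr (Or.inl rfl)⟩
    · exact ⟨('p','q'), h, Or.inr (Or.inr (Or.inl rfl))⟩
    · exact ⟨('x','y'), h, Or.inr (Or.inr (Or.inr rfl))⟩
  · rintro ⟨p, hp, (h | h | h | h)⟩ <;> subst h <;> simp_all

-- B's doubled-letter substring search over the distinct characters equals A's adjacent-equal test.
lemma double_eq (l : List Char) :
    (PySem.Set.ofList l).any (fun c => PySem.Chars.isIn [c, c] l) =
      (l.zip l.tail).any (fun p => p.1 == p.2) := by
  rw [Bool.eq_iff_iff]
  simp only [List.any_eq_true, PySem.Chars.isIn_iff_infix, infix_pair_iff, beq_iff_eq]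
  constructor
  · rintro ⟨c, _, hz⟩; exact ⟨(c, c), hz, rfl⟩
  · rintro ⟨⟨a, b⟩, hz, h⟩
    cases h
    refine ⟨a, ?_, hz⟩
    have : a ∈ l := (List.of_mem_zip hz).1
    simpa [PySem.Set.mem_ofList] using this
-- B's per-vowel count sum is A's vowel predicate count.
lemma vowel_sum_eq (l : List Char) :
    (VOYELS.map (fun v => l.count v)).sum = l.countP (fun c => VOYELS.contains c) := by
  induction l with
  | nil => simp [VOYELS]
  | cons c t ih =>
    simp only [VOYELS, List.map_cons, List.map_nil, List.sum_cons, List.sum_nil,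
      List.count_cons, List.countP_cons, List.contains_cons, List.contains_nil] at *
    by_cases h1 : c = 'a' <;> by_cases h2 : c = 'e' <;> by_cases h3 : c = 'i' <;>
      by_cases h4 : c = 'o' <;> by_cases h5 : c = 'u' <;> simp_all <;> omega

-- ===== VERDICT (by name: the statement is the Claim_ definition above) =====
theorem amINice_spec : Claim_equal_amINice := by
  intro text _ hpre
  unfold Spec_amINice amINice amINice_alt
  have hne : text.toList ≠ [] := by
    simpa [String.toList_eq_nil_iff] using hpre
  cases hl : text.toList with
  | nil => exact absurd hl hne
  | cons c rest =>
    simp only [amINiceLoop_eq, naughty_eq, double_eq, vowel_sum_eq, List.tail_cons,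
      List.countP_cons, Bool.false_or]
    cases hn : ((c :: rest).zip rest).any (fun p => NAUGHTY_pairs.contains p) with
    | true => simp
    | false =>
      simp only [Bool.false_eq_true, if_false]
      cases hd : ((c :: rest).zip rest).any (fun p => p.1 == p.2) <;>
        cases hv : VOYELS.contains c <;>
          (try simp) <;> (rw [Bool.eq_iff_iff]; simp; try omega)

@[simp]
theorem amINice_raises : Claim_raises_amINice := by
  unfold Claim_raises_amINice
  exact ⟨fun t _ h hp => hp h, by decide⟩
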